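-- pv_equiv track=rewrite | github.com/anthonywritescode/aoc2023 | day14/part2.py | compute
-- ===== SOURCE A (Python) =====
-- from typing import Iterable
-- from typing import Sequence
--
-- def _compute_line(s: Sequence[str]) -> str:
--     line = list(s)
--     length = len(s)
--     target = 0
--     looking = 0
--     while target < length:
--         if line[target] == 'O':
--             target += 1
--         elif line[target] == '#':
--             target += 1
--         elif line[target] == '.':
--             looking = max(looking, target + 1)
--             for looking in range(looking, length):
--                 if line[looking] == '#':
--                     target = looking + 1
--                     break
--                 elif line[looking] == 'O':
--                     line[target], line[looking] = line[looking], line[target]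
--                     target += 1
--                     looking += 1
--                     break
--             else:
--                 break
--         else:
--             target += 1
--
--     return ''.join(line)
--
-- def _columns(s: str) -> Iterable[tuple[str, ...]]:
--     return zip(*s.splitlines())
--
-- def _cycle(s: str) -> str:
--     # north
--     s = '\n'.join(_compute_line(line) for line in _columns(s))
--     s = '\n'.join(''.join(line) for line in _columns(s))
--     # west
--     s = '\n'.join(_compute_line(line) for line in s.splitlines())
--     # south
--     s = '\n'.join(_compute_line(line[::-1])[::-1] for line in _columns(s))
--     s = '\n'.join(''.join(line) for line in _columns(s))
--     # east
--     s = '\n'.join(_compute_line(line[::-1])[::-1] for line in s.splitlines())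
--
--     return s
--
-- def _load(s: str) -> int:
--     return sum(
--         sum(len(line) - i for i, c in enumerate(line) if c == 'O')
--         for line in zip(*s.splitlines())
--     )
--
-- N = 1000000000
--
-- def compute(s: str) -> int:
--     seen = {s.rstrip(): 0}
--     i = 0
--     while True:
--         i += 1
--         s = _cycle(s)
--         if s in seen:
--             break
--         else:
--             seen[s] = i
--
--     for _ in range((N - seen[s]) % (i - seen[s])):
--         s = _cycle(s)
--     return _load(s)
-- ===== SOURCE B (Python) =====
-- from typing import Iterable
-- from typing import Sequence
--
-- N = 1000000000
--
-- def _roll_segment(seg: str) -> str: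
--     k = seg.count('O')
--     out = []
--     for c in seg:
--         if c == 'O' or c == '.':
--             if k > 0:
--                 out.append('O')
--                 k -= 1
--             else:
--                 out.append('.')
--         else:
--             out.append(c)
--     return ''.join(out)
--
-- def _compute_line(s: Sequence[str]) -> str:
--     return '#'.join(_roll_segment(seg) for seg in ''.join(s).split('#'))
--
-- def _columns(s: str) -> Iterable[tuple[str, ...]]:
--     return zip(*s.splitlines())
--
-- def _cycle(s: str) -> str:
--     # north
--     s = '\n'.join(_compute_line(line) for line in _columns(s))
--     s = '\n'.join(''.join(line) for line in _columns(s))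
--     # west
--     s = '\n'.join(_compute_line(line) for line in s.splitlines())
--     # south
--     s = '\n'.join(_compute_line(line[::-1])[::-1] for line in _columns(s))
--     s = '\n'.join(''.join(line) for line in _columns(s))
--     # east
--     s = '\n'.join(_compute_line(line[::-1])[::-1] for line in s.splitlines())
--
--     return s
--
-- def _load(s: str) -> int:
--     return sum(
--         sum(len(line) - i for i, c in enumerate(line) if c == 'O')
--         for line in zip(*s.splitlines())
--     )
--
-- def compute(s: str) -> int:
--     states = [s.rstrip()]
--     s = _cycle(s)
--     while s not in states:
--         states.append(s)
--         s = _cycle(s)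
--     mu = states.index(s)
--     for _ in range((N - mu) % (len(states) - mu)):
--         s = _cycle(s)
--     return _load(s)
-- ===== Notes on version B (the rewrite author's own statement) =====
-- stated objective: simpler
-- what changed: The in-place two-pointer rolling scan of _compute_line is replaced by splitting each line on '#' and rebuilding every segment from its rock count ('O's first, then '.'s, other characters kept in place), and the cycle-detection dict is replaced by a plain list of seen states queried with index().
import Mathlib
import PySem

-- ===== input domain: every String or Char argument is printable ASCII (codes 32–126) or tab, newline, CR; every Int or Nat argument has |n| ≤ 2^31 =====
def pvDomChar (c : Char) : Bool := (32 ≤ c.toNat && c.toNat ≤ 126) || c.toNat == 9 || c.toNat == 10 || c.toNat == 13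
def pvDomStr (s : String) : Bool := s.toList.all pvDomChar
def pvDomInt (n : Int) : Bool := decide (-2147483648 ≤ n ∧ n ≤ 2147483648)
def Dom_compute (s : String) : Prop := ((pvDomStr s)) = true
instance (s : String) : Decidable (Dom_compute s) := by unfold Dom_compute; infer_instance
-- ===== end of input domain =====

-- B replaces A's two-pointer in-place rolling scan by a split-on-'#'/count-and-rebuild
-- per segment and A's cycle-detection dict by a list of seen states (objective: simpler).
-- Both cycle-detection loops are ported with the same large fuel guard (totality only).

-- ===== PORT A =====
-- shared plumbing, identical source lines in both Python files:
-- zip(*rows)  (truncates to the shortest row, empty for no rows)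
def pvZipStar (rows : List (List Char)) : List (List Char) :=
  match (rows.map List.length).min? with
  | none => []
  | some m => (List.range m).map (fun i => rows.map (fun r => r.getD i ' '))

-- _columns(s) = zip(*s.splitlines())
def pvColumns (s : String) : List (List Char) :=
  pvZipStar ((PySem.Str.splitlines s).map String.toList)

-- '\n'.join(...) over lines given as char lists
def pvJoinLines (ls : List (List Char)) : String :=
  String.ofList (PySem.Chars.join ['\n'] ls)

-- _load(s)
def pvLoad (s : String) : Int :=
  ((pvColumns s).map (fun line =>
    (((PySem.List.enumerate line).filter (fun p => p.2 == 'O')).map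
      (fun p => PySem.List.len line - p.1)).sum)).sum

def pvN : Int := 1000000000
def pvFuel : Nat := 1000000000

-- the inner 'for looking in range(looking, length)' scan of A's _compute_line;
-- 'none' is the for-else case (which breaks the outer while loop)
def clInner (line : List Char) (length target looking : Nat) :
    Option (List Char × Nat × Nat) :=
  if h : looking < length then
    if line.getD looking ' ' = '#' then some (line, looking + 1, looking)
    else if line.getD looking ' ' = 'O' then
      some ((line.set target (line.getD looking ' ')).set looking (line.getD target ' '),
            target + 1, looking + 1)
    else clInner line length target (looking + 1)
  else none
  termination_by length - looking
  decreasing_by omega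

-- the outer while loop of A's _compute_line; target strictly increases on every pass,
-- so fuel = length + 1 only makes the very same computation total
def clOuter (fuel : Nat) (line : List Char) (length target looking : Nat) : List Char :=
  match fuel with
  | 0 => line
  | fuel + 1 =>
    if target < length then
      if line.getD target ' ' = 'O' then clOuter fuel line length (target + 1) looking
      else if line.getD target ' ' = '#' then clOuter fuel line length (target + 1) looking
      else if line.getD target ' ' = '.' then
        match clInner line length target (max looking (target + 1)) with
        | some (l', t', lk') => clOuter fuel l' length t' lk'
        | none => line
      else clOuter fuel line length (target + 1) looking
    else line

def computeLineA (s : List Char) : List Char :=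
  clOuter (s.length + 1) s s.length 0 0

def cycleA (s : String) : String :=
  let s := pvJoinLines ((pvColumns s).map computeLineA)
  let s := pvJoinLines (pvColumns s)
  let s := pvJoinLines ((PySem.Str.splitlines s).map (fun l => computeLineA l.toList))
  let s := pvJoinLines ((pvColumns s).map (fun l => (computeLineA l.reverse).reverse))
  let s := pvJoinLines (pvColumns s)
  let s := pvJoinLines ((PySem.Str.splitlines s).map (fun l => (computeLineA l.toList.reverse).reverse))
  s

-- A's 'while True' cycle-detection loop over the seen dict (fuel guard for totality only)
def loopA (fuel : Nat) (seen : PySem.Dict String Int) (i : Int) (s : String) : Int :=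
  match fuel with
  | 0 => 0
  | fuel + 1 =>
    let i := i + 1
    let s := cycleA s
    if seen.contains s then
      let j := seen.getD s 0
      pvLoad ((PySem.List.pyRange 0 (PySem.Int.mod (pvN - j) (i - j)) 1).foldl
        (fun t _ => cycleA t) s)
    else loopA fuel (seen.insert s i) i s

def compute (s : String) : Int :=
  loopA pvFuel (PySem.Dict.empty.insert (PySem.Str.rstrip s) 0) 0 s

-- ===== PORT B =====
-- Source B's per-segment rebuild loop: the first k '.'/'O' slots become 'O', the rest '.',
-- every other character is kept in place
def fillSeg : List Char → Nat → List Char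
  | [], _ => []
  | c :: rest, k =>
    if c = 'O' ∨ c = '.' then
      if 0 < k then 'O' :: fillSeg rest (k - 1) else '.' :: fillSeg rest k
    else c :: fillSeg rest k

def rollSeg (seg : List Char) : List Char := fillSeg seg (seg.count 'O')

-- Source B's _compute_line: '#'.join(_roll_segment(seg) for seg in ''.join(s).split('#'))
def computeLineB (s : List Char) : List Char :=
  PySem.Chars.join ['#'] ((s.splitOn '#').map rollSeg)

def cycleB (s : String) : String :=
  let s := pvJoinLines ((pvColumns s).map computeLineB)
  let s := pvJoinLines (pvColumns s)
  let s := pvJoinLines ((PySem.Str.splitlines s).map (fun l => computeLineB l.toList))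
  let s := pvJoinLines ((pvColumns s).map (fun l => (computeLineB l.reverse).reverse))
  let s := pvJoinLines (pvColumns s)
  let s := pvJoinLines ((PySem.Str.splitlines s).map (fun l => (computeLineB l.toList.reverse).reverse))
  s

-- Source B's cycle-detection loop over the list of seen states (same fuel guard)
def loopB (fuel : Nat) (states : List String) (s : String) : Int :=
  match fuel with
  | 0 => 0
  | fuel + 1 =>
    if states.contains s then
      let mu : Int := ((PySem.List.index? states s).getD 0 : Nat)
      pvLoad ((PySem.List.pyRange 0 (PySem.Int.mod (pvN - mu) (PySem.List.len states - mu)) 1).foldl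
        (fun t _ => cycleB t) s)
    else loopB fuel (states ++ [s]) (cycleB s)

def compute_alt (s : String) : Int :=
  loopB pvFuel [PySem.Str.rstrip s] (cycleB s)

-- ===== PRECONDITION & SPEC =====
def Spec_compute (s : String) (out : Int) : Prop := out = compute_alt s
instance (s : String) (out : Int) : Decidable (Spec_compute s out) := by unfold Spec_compute; infer_instance

-- ===== CLAIM (what is proved, stated in full; the proofs are below) =====
def Claim_equal_compute : Prop := ∀ (s : String), Dom_compute s → Spec_compute s (compute s)

-- ===== LEMMAS AND PROOFS =====

-- ---- facts about B's line roll ----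

theorem splitOn_ne_nil' (l : List Char) : List.splitOn '#' l ≠ [] := by
  simpa [List.splitOn] using List.splitOnP_ne_nil _ l

theorem fillSeg_cons (c : Char) (rest : List Char) (k : Nat) :
    fillSeg (c :: rest) k =
      if c = 'O' ∨ c = '.' then
        if 0 < k then 'O' :: fillSeg rest (k - 1) else '.' :: fillSeg rest k
      else c :: fillSeg rest k := rfl

theorem clOuter_succ (fuel : Nat) (line : List Char) (length target looking : Nat) :
    clOuter (fuel + 1) line length target looking =
      if target < length then
        if line.getD target ' ' = 'O' then clOuter fuel line length (target + 1) looking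
        else if line.getD target ' ' = '#' then clOuter fuel line length (target + 1) looking
        else if line.getD target ' ' = '.' then
          match clInner line length target (max looking (target + 1)) with
          | some (l', t', lk') => clOuter fuel l' length t' lk'
          | none => line
        else clOuter fuel line length (target + 1) looking
      else line := rfl

theorem set_append_cons_len {xs : List Char} {n : Nat} (h : xs.length = n) (y c : Char)
    (w : List Char) : (xs ++ y :: w).set n c = xs ++ c :: w := by
  subst h
  induction xs with
  | nil => rfl
  | cons a t ih => simpa using ih

theorem fillSeg_of_no_O {u : List Char} (h : 'O' ∉ u) : fillSeg u 0 = u := by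
  induction u with
  | nil => rfl
  | cons c rest ih =>
    simp only [List.mem_cons, not_or] at h
    rw [fillSeg_cons]
    by_cases hdot : c = '.'
    · subst hdot; simp [ih h.2]
    · rw [if_neg (fun hor => hor.elim (fun hc => h.1 hc.symm) hdot), ih h.2]

theorem fillSeg_slot_congr (u : List Char) (k : Nat) (w : List Char) :
    fillSeg (u ++ 'O' :: w) k = fillSeg (u ++ '.' :: w) k := by
  induction u generalizing k with
  | nil => unfold fillSeg; simp
  | cons c rest ih => unfold fillSeg; simp only [List.cons_append]; split_ifs <;> simp [ih]

theorem splitOn_cons_self (l : List Char) :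
    List.splitOn '#' ('#' :: l) = [] :: List.splitOn '#' l := by
  simp [List.splitOn, List.splitOnP_cons]

theorem splitOn_cons_ne {a : Char} (l : List Char) (h : a ≠ '#') :
    List.splitOn '#' (a :: l) = List.modifyHead (List.cons a) (List.splitOn '#' l) := by
  simp [List.splitOn, List.splitOnP_cons, h]

theorem splitOn_append_no_hash {p : List Char} (h : '#' ∉ p) (w : List Char) :
    List.splitOn '#' (p ++ w) = List.modifyHead (p ++ ·) (List.splitOn '#' w) := by
  induction p with
  | nil =>
    simp only [List.nil_append]
    cases hh : List.splitOn '#' w with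
    | nil => exact absurd hh (splitOn_ne_nil' w)
    | cons x t => simp
  | cons c rest ih =>
    simp only [List.mem_cons, not_or] at h
    rw [List.cons_append, splitOn_cons_ne _ (fun hc => h.1 hc.symm), ih h.2]
    cases hh : List.splitOn '#' w with
    | nil => exact absurd hh (splitOn_ne_nil' w)
    | cons x t => simp

-- join ['#'] ((c :: s) :: t) = c :: join ['#'] (s :: t)
theorem join_cons_head (c : Char) (s : List Char) (t : List (List Char)) :
    PySem.Chars.join ['#'] ((c :: s) :: t) = c :: PySem.Chars.join ['#'] (s :: t) := by
  cases t with
  | nil => simp [PySem.Chars.join_singleton]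
  | cons q rest => rw [PySem.Chars.join_cons_cons, PySem.Chars.join_cons_cons]; simp

theorem computeLineB_nil : computeLineB [] = [] := by
  simp [computeLineB, List.splitOn, rollSeg, fillSeg, PySem.Chars.join_singleton]

theorem computeLineB_hash (l : List Char) :
    computeLineB ('#' :: l) = '#' :: computeLineB l := by
  unfold computeLineB
  rw [splitOn_cons_self]
  cases hh : List.splitOn '#' l with
  | nil => exact absurd hh (splitOn_ne_nil' l)
  | cons x t =>
    simp only [List.map_cons]
    rw [PySem.Chars.join_cons_cons]
    simp [rollSeg, fillSeg]

theorem computeLineB_cons_fixed {a : Char} (l : List Char) (h1 : a ≠ '#') (h2 : a ≠ '.') :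
    computeLineB (a :: l) = a :: computeLineB l := by
  unfold computeLineB
  rw [splitOn_cons_ne _ h1]
  cases hh : List.splitOn '#' l with
  | nil => exact absurd hh (splitOn_ne_nil' l)
  | cons x t =>
    simp only [List.modifyHead_cons, List.map_cons]
    have hroll : rollSeg (a :: x) = a :: rollSeg x := by
      by_cases hO : a = 'O'
      · subst hO
        rw [rollSeg, rollSeg]
        have hc : ('O' :: x).count 'O' = x.count 'O' + 1 := by simp
        rw [hc, fillSeg_cons]
        simp
      · rw [rollSeg, rollSeg]
        have hc : (a :: x).count 'O' = x.count 'O' := by simp [hO]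
        rw [hc, fillSeg_cons, if_neg (fun hor => hor.elim hO h2)]
    rw [hroll, join_cons_head]

-- any member of the head piece of a split is a member of the original list
theorem mem_of_mem_splitOn_head : ∀ (l x : List Char) (t : List (List Char)),
    List.splitOn '#' l = x :: t → ∀ c ∈ x, c ∈ l := by
  intro l
  induction l with
  | nil =>
    intro x t hs c hc
    rw [List.splitOn_nil] at hs
    injection hs with h1 _
    subst h1
    simp at hc
  | cons a l ih =>
    intro x t hs c hc
    by_cases ha : a = '#'
    · subst ha
      rw [splitOn_cons_self] at hs
      injection hs with h1 _
      subst h1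
      simp at hc
    · rw [splitOn_cons_ne _ ha] at hs
      cases hsl : List.splitOn '#' l with
      | nil => exact absurd hsl (splitOn_ne_nil' l)
      | cons x0 t0 =>
        rw [hsl] at hs
        simp only [List.modifyHead_cons] at hs
        injection hs with h1 _
        subst h1
        rcases List.mem_cons.1 hc with h | h
        · simp [h]
        · exact List.mem_cons_of_mem _ (ih x0 t0 hsl c h)

theorem computeLineB_of_no_O {l : List Char} (h : 'O' ∉ l) : computeLineB l = l := by
  induction l with
  | nil => exact computeLineB_nil
  | cons c rest ih =>
    simp only [List.mem_cons, not_or] at h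
    by_cases hh : c = '#'
    · subst hh; rw [computeLineB_hash, ih h.2]
    · by_cases hd : c = '.'
      · subst hd
        unfold computeLineB
        rw [splitOn_cons_ne _ (by decide)]
        cases hs : List.splitOn '#' rest with
        | nil => exact absurd hs (splitOn_ne_nil' rest)
        | cons x t =>
          simp only [List.modifyHead_cons, List.map_cons]
          have hxO : 'O' ∉ x := fun hc => h.2 (mem_of_mem_splitOn_head rest x t hs 'O' hc)
          have hcx : x.count 'O' = 0 := List.count_eq_zero.2 hxO
          have hcnt : ('.' :: x).count 'O' = 0 := by simp [hcx]
          have hroll : rollSeg ('.' :: x) = '.' :: rollSeg x := by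
            rw [rollSeg, hcnt, rollSeg, hcx, fillSeg_cons]
            simp
          rw [hroll, join_cons_head]
          have hrest : computeLineB rest = rest := ih h.2
          unfold computeLineB at hrest
          rw [hs] at hrest
          simp only [List.map_cons] at hrest
          rw [hrest]
      · rw [computeLineB_cons_fixed rest hh hd, ih h.2]

-- B moves the first rock of a segment onto a leading free slot
theorem computeLineB_dot_O {v : List Char} (hO : 'O' ∉ v) (hH : '#' ∉ v) (w : List Char) :
    computeLineB ('.' :: v ++ 'O' :: w) = 'O' :: computeLineB (v ++ '.' :: w) := by
  have hp : '#' ∉ ('.' :: v) := by simp [hH]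
  unfold computeLineB
  rw [show ('.' :: v ++ 'O' :: w) = ('.' :: v) ++ 'O' :: w from rfl,
      splitOn_append_no_hash hp, splitOn_cons_ne _ (by decide),
      splitOn_append_no_hash hH, splitOn_cons_ne _ (by decide)]
  cases hs : List.splitOn '#' w with
  | nil => exact absurd hs (splitOn_ne_nil' w)
  | cons x t =>
    simp only [List.modifyHead_cons, List.map_cons]
    have hcnt : (('.' :: v) ++ 'O' :: x).count 'O' = x.count 'O' + 1 := by
      simp [List.count_cons, List.count_append, List.count_eq_zero.2 hO]
    have hcnt2 : (v ++ '.' :: x).count 'O' = x.count 'O' := by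
      simp [List.count_cons, List.count_append, List.count_eq_zero.2 hO]
    have hroll1 : rollSeg (('.' :: v) ++ 'O' :: x) = 'O' :: fillSeg (v ++ '.' :: x) (x.count 'O') := by
      rw [rollSeg, hcnt]
      show fillSeg ('.' :: (v ++ 'O' :: x)) (x.count 'O' + 1) = _
      rw [fillSeg_cons, if_pos (Or.inr rfl), if_pos (Nat.succ_pos _)]
      simp [fillSeg_slot_congr]
    have hroll2 : rollSeg (v ++ '.' :: x) = fillSeg (v ++ '.' :: x) (x.count 'O') := by
      rw [rollSeg, hcnt2]
    rw [hroll1, hroll2, join_cons_head]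

-- a rock-free prefix up to a '#' is returned unchanged
theorem computeLineB_dot_hash {v : List Char} (hO : 'O' ∉ v) (hH : '#' ∉ v) (w : List Char) :
    computeLineB ('.' :: v ++ '#' :: w) = '.' :: v ++ '#' :: computeLineB w := by
  have hp : '#' ∉ ('.' :: v) := by simp [hH]
  unfold computeLineB
  rw [show ('.' :: v ++ '#' :: w) = ('.' :: v) ++ '#' :: w from rfl,
      splitOn_append_no_hash hp, splitOn_cons_self]
  cases hs : List.splitOn '#' w with
  | nil => exact absurd hs (splitOn_ne_nil' w)
  | cons x t =>
    simp only [List.modifyHead_cons, List.append_nil, List.map_cons]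
    rw [PySem.Chars.join_cons_cons]
    have hroll : rollSeg ('.' :: v) = '.' :: v := by
      have hc : ('.' :: v).count 'O' = 0 := by
        simp [List.count_cons, List.count_eq_zero.2 hO]
      rw [rollSeg, hc, fillSeg_of_no_O (by simp [hO])]
    rw [hroll]
    simp

-- ---- characterisation of A's inner scan ----

theorem clInner_cases (line : List Char) (length target looking : Nat) :
    (clInner line length target looking = none ∧
      ∀ j, looking ≤ j → j < length → line.getD j ' ' ≠ '#' ∧ line.getD j ' ' ≠ 'O')
  ∨ (∃ j, looking ≤ j ∧ j < length ∧
      (∀ i, looking ≤ i → i < j → line.getD i ' ' ≠ '#' ∧ line.getD i ' ' ≠ 'O') ∧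
      ((line.getD j ' ' = '#' ∧ clInner line length target looking = some (line, j + 1, j)) ∨
       (line.getD j ' ' ≠ '#' ∧ line.getD j ' ' = 'O' ∧
        clInner line length target looking =
          some ((line.set target 'O').set j (line.getD target ' '), target + 1, j + 1)))) := by
  generalize hn : length - looking = n
  induction n generalizing looking with
  | zero =>
    left
    constructor
    · unfold clInner; rw [dif_neg (by omega)]
    · intro j hj hjl; omega
  | succ n ih =>
    have hlk : looking < length := by omega
    by_cases h1 : line.getD looking ' ' = '#'
    · right
      refine ⟨looking, le_rfl, hlk, fun i hi hij => absurd (lt_of_le_of_lt hi hij) (lt_irrefl _),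
        Or.inl ⟨h1, ?_⟩⟩
      unfold clInner
      rw [dif_pos hlk, if_pos h1]
    · by_cases h2 : line.getD looking ' ' = 'O'
      · right
        refine ⟨looking, le_rfl, hlk, fun i hi hij => absurd (lt_of_le_of_lt hi hij) (lt_irrefl _),
          Or.inr ⟨h1, h2, ?_⟩⟩
        unfold clInner
        rw [dif_pos hlk, if_neg h1, if_pos h2, h2]
      · have hrec : clInner line length target looking = clInner line length target (looking + 1) := by
          conv_lhs => unfold clInner
          rw [dif_pos hlk, if_neg h1, if_neg h2]
        rcases ih (looking + 1) (by omega) with ⟨hnone, hall⟩ | ⟨j, hj1, hj2, hscan, hres⟩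
        · left
          refine ⟨hrec ▸ hnone, fun j hj hjl => ?_⟩
          by_cases hje : j = looking
          · subst hje; exact ⟨h1, h2⟩
          · exact hall j (by omega) hjl
        · right
          refine ⟨j, by omega, hj2, fun i hi hij => ?_, hrec ▸ hres⟩
          by_cases hie : i = looking
          · subst hie; exact ⟨h1, h2⟩
          · exact hscan i (by omega) hij

-- ---- main invariant: A's while loop computes B's roll of the unprocessed suffix ----

theorem clOuter_spec (fuel : Nat) :
    ∀ (line : List Char) (target looking : Nat),
    line.length < target + fuel →
    (∀ j, target ≤ j → j < looking → j < line.length →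
        line.getD j ' ' ≠ '#' ∧ line.getD j ' ' ≠ 'O') →
    clOuter fuel line line.length target looking =
      line.take target ++ computeLineB (line.drop target) := by
  induction fuel with
  | zero =>
    intro line target looking hf _
    have ht : line.length ≤ target := by omega
    simp [clOuter, List.take_of_length_le ht, List.drop_of_length_le ht, computeLineB_nil]
  | succ fuel ih =>
    intro line target looking hf hinv
    by_cases htl : target < line.length
    case neg =>
      have ht : line.length ≤ target := by omega
      rw [clOuter_succ, if_neg htl]
      simp [List.take_of_length_le ht, List.drop_of_length_le ht, computeLineB_nil]
    case pos =>
    have hdropt : line.drop target = line.getD target ' ' :: line.drop (target + 1) := by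
      rw [List.drop_eq_getElem_cons htl, List.getD_eq_getElem _ _ htl]
    have htake1 : line.take (target + 1) = line.take target ++ [line.getD target ' '] := by
      rw [List.take_add_one, List.getElem?_eq_getElem htl, List.getD_eq_getElem _ _ htl]
      rfl
    have hstep : ∀ c, line.getD target ' ' = c → c ≠ '#' → c ≠ '.' →
        clOuter fuel line line.length (target + 1) looking =
          line.take target ++ computeLineB (line.drop target) := by
      intro c hc h1 h2
      rw [ih line (target + 1) looking (by omega)
            (fun j hj hjl hjlen => hinv j (by omega) hjl hjlen),
          htake1, hdropt, hc, computeLineB_cons_fixed _ h1 h2]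
      simp
    rw [clOuter_succ, if_pos htl]
    by_cases hO : line.getD target ' ' = 'O'
    · rw [if_pos hO]
      exact hstep 'O' hO (by decide) (by decide)
    · rw [if_neg hO]
      by_cases hH : line.getD target ' ' = '#'
      · rw [if_pos hH]
        rw [ih line (target + 1) looking (by omega)
              (fun j hj hjl hjlen => hinv j (by omega) hjl hjlen),
            htake1, hdropt, hH, computeLineB_hash]
        simp
      · rw [if_neg hH]
        by_cases hD : line.getD target ' ' = '.'
        case neg =>
          rw [if_neg hD]
          exact hstep _ rfl hH hD
        case pos =>
        rw [if_pos hD]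
        rcases clInner_cases line line.length target (max looking (target + 1)) with
          ⟨hnone, hall⟩ | ⟨j, hj1, hj2, hscan, hres⟩
        · -- no rock beyond target: the loop breaks and returns the line unchanged
          rw [hnone]
          show line = line.take target ++ computeLineB (line.drop target)
          have hno : 'O' ∉ line.drop target := by
            intro hmem
            rcases List.getElem_of_mem hmem with ⟨k, hk, hEq⟩
            have hklen : target + k < line.length := by
              have hlk := hk
              rw [List.length_drop] at hlk
              omega
            rw [List.getElem_drop] at hEq
            have hgd : line.getD (target + k) ' ' = 'O' := by
              rw [List.getD_eq_getElem _ _ hklen]; exact hEq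
            rcases Nat.lt_or_ge (target + k) (max looking (target + 1)) with hlt | hge
            · by_cases hk0 : k = 0
              · subst hk0
                rw [Nat.add_zero] at hgd
                rw [hD] at hgd
                exact absurd hgd (by decide)
              · exact (hinv (target + k) (by omega) (by omega) hklen).2 hgd
            · exact (hall _ hge hklen).2 hgd
          rw [computeLineB_of_no_O hno]
          exact (List.take_append_drop target line).symm
        · -- a '#' or an 'O' was found at position j ≥ target + 1
          have hjt : target + 1 ≤ j := le_trans (le_max_right _ _) hj1
          set v := (line.drop (target + 1)).take (j - (target + 1)) with hv
          have hvlen : v.length = j - (target + 1) := by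
            rw [hv, List.length_take, List.length_drop]; omega
          have hdrop1 : line.drop (target + 1) = v ++ line.getD j ' ' :: line.drop (j + 1) := by
            conv_lhs => rw [← List.take_append_drop (j - (target + 1)) (line.drop (target + 1))]
            rw [List.drop_drop, show target + 1 + (j - (target + 1)) = j from by omega,
                List.drop_eq_getElem_cons hj2, List.getD_eq_getElem _ _ hj2]
          have hvfree : ∀ c ∈ v, c ≠ 'O' ∧ c ≠ '#' := by
            intro c hc
            rcases List.getElem_of_mem hc with ⟨k, hk, hEq⟩
            have hklt : k < j - (target + 1) := by rw [hvlen] at hk; exact hk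
            have hkl : target + 1 + k < line.length := by omega
            have hcc : line.getD (target + 1 + k) ' ' = c := by
              rw [List.getD_eq_getElem _ _ hkl, ← hEq]
              simp [hv, List.getElem_take, List.getElem_drop]
            rcases Nat.lt_or_ge (target + 1 + k) (max looking (target + 1)) with hlt | hge
            · have hr := hinv (target + 1 + k) (by omega) (by omega) hkl
              rw [hcc] at hr
              exact ⟨hr.2, hr.1⟩
            · have hr := hscan (target + 1 + k) hge (by omega)
              rw [hcc] at hr
              exact ⟨hr.2, hr.1⟩
          have hOv : 'O' ∉ v := fun hm => (hvfree _ hm).1 rfl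
          have hHv : '#' ∉ v := fun hm => (hvfree _ hm).2 rfl
          rcases hres with ⟨hHj, hsome⟩ | ⟨hHj, hOj, hsome⟩
          · -- '#' found: everything up to and including j is final
            rw [hsome]
            show clOuter fuel line line.length (j + 1) j =
              line.take target ++ computeLineB (line.drop target)
            rw [ih line (j + 1) j (by omega) (fun i hi1 hi2 _ => (by omega : False).elim)]
            have hsplit : line.drop target = '.' :: v ++ '#' :: line.drop (j + 1) := by
              rw [hdropt, hdrop1, hD, hHj]
              exact rfl
            have htakej : line.take (j + 1) = line.take target ++ ('.' :: v ++ ['#']) := by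
              rw [show j + 1 = target + (v.length + 2) from by omega, List.take_add]
              have htk : (line.drop target).take (v.length + 2) = '.' :: v ++ ['#'] := by
                rw [hsplit, show ('.' :: v ++ '#' :: line.drop (j + 1)) =
                      ('.' :: v ++ ['#']) ++ line.drop (j + 1) from by simp,
                    List.take_left' (by simp)]
              rw [htk]
            rw [hsplit, computeLineB_dot_hash hOv hHv, htakej]
            simp
          · -- 'O' found: it is swapped onto position target
            set line' := (line.set target 'O').set j '.' with hl'
            have hset : (line.set target 'O').set j (line.getD target ' ') = line' := by
              rw [hD]
            rw [hsome, hset]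
            show clOuter fuel line' line.length (target + 1) (j + 1) =
              line.take target ++ computeLineB (line.drop target)
            have hlen' : line'.length = line.length := by simp [hl']
            have hget' : ∀ m, m < line.length → m ≠ target → m ≠ j →
                line'.getD m ' ' = line.getD m ' ' := by
              intro m hm hmt hmj
              have hm' : m < line'.length := by rw [hlen']; exact hm
              rw [List.getD_eq_getElem _ _ hm', List.getD_eq_getElem _ _ hm]
              have h1 : ¬ (j = m) := fun heq => hmj heq.symm
              have h2 : ¬ (target = m) := fun heq => hmt heq.symm
              simp [hl', List.getElem_set, h1, h2]
            have hgj : line'.getD j ' ' = '.' := by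
              have hj' : j < line'.length := by rw [hlen']; exact hj2
              rw [List.getD_eq_getElem _ _ hj']
              simp [hl', List.getElem_set]
            have hinv' : ∀ m, target + 1 ≤ m → m < j + 1 → m < line'.length →
                line'.getD m ' ' ≠ '#' ∧ line'.getD m ' ' ≠ 'O' := by
              intro m h1 h2 h3
              by_cases hmj : m = j
              · subst hmj; rw [hgj]; exact ⟨by decide, by decide⟩
              · have hm : m < line.length := by rw [hlen'] at h3; exact h3
                rw [hget' m hm (by omega) hmj]
                rcases Nat.lt_or_ge m (max looking (target + 1)) with hlt | hge
                · exact hinv m (by omega) (by omega) hm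
                · exact hscan m hge (by omega)
            have ihres := ih line' (target + 1) (j + 1) (by rw [hlen']; omega) hinv'
            rw [hlen'] at ihres
            rw [ihres]
            have hlt' : (line.take target).length = target :=
              List.length_take_of_le (le_of_lt htl)
            have htake' : line'.take (target + 1) = line.take target ++ ['O'] := by
              rw [hl', List.take_set,
                  List.set_eq_of_length_le (by rw [List.length_take]; omega),
                  List.take_set, htake1, hD]
              exact set_append_cons_len hlt' '.' 'O' []
            have hdrop' : line'.drop (target + 1) = v ++ '.' :: line.drop (j + 1) := by
              rw [hl', List.drop_set, if_neg (show ¬ (j < target + 1) from by omega),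
                  List.drop_set, if_pos (show target < target + 1 from by omega),
                  hdrop1, hOj]
              exact set_append_cons_len hvlen 'O' '.' _
            rw [htake', hdrop']
            have hsplit : line.drop target = '.' :: v ++ 'O' :: line.drop (j + 1) := by
              rw [hdropt, hdrop1, hD, hOj]
              exact rfl
            rw [hsplit, computeLineB_dot_O hOv hHv]
            simp

theorem computeLine_eq (l : List Char) : computeLineA l = computeLineB l := by
  have h := clOuter_spec (l.length + 1) l 0 0 (by omega) (by omega)
  simpa [computeLineA] using h

theorem cycle_eq : cycleA = cycleB := by
  funext s
  simp only [cycleA, cycleB, funext computeLine_eq]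

-- ---- the dict-based and the list-based cycle-detection loops agree ----

theorem idxOf?_singleton (t s : String) : List.idxOf? t [s] = if s = t then some 0 else none := by
  simp [List.idxOf?, List.findIdx?_cons]

theorem idxOf?_append_singleton (t s : String) (states : List String) :
    List.idxOf? t (states ++ [s]) =
      (List.idxOf? t states).or (if t = s then some states.length else none) := by
  induction states with
  | nil =>
    by_cases h : t = s
    · simp [h, idxOf?_singleton]
    · have h' : ¬ s = t := fun hh => h hh.symm
      simp [idxOf?_singleton, h, h']
  | cons a states ih =>
    show List.idxOf? t (a :: (states ++ [s])) = _
    by_cases h : a = t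
    · simp [List.idxOf?, List.findIdx?_cons, h]
    · have hL : List.idxOf? t (a :: (states ++ [s])) =
          (List.idxOf? t (states ++ [s])).map (· + 1) := by
        simp [List.idxOf?, List.findIdx?_cons, h]
      have hR : List.idxOf? t (a :: states) = (List.idxOf? t states).map (· + 1) := by
        simp [List.idxOf?, List.findIdx?_cons, h]
      rw [hL, hR, ih]
      cases ho : List.idxOf? t states with
      | some k => simp
      | none => by_cases hts : t = s <;> simp [hts]

theorem loop_eq (fuel : Nat) :
    ∀ (seen : PySem.Dict String Int) (states : List String) (i : Int) (s : String),
    (∀ t, seen.get? t = (List.idxOf? t states).map (fun k => (k : Int))) →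
    i = (states.length : Int) - 1 →
    loopA fuel seen i s = loopB fuel states (cycleB s) := by
  induction fuel with
  | zero => intro _ _ _ _ _ _; rfl
  | succ fuel ih =>
    intro seen states i s hseen hi
    rw [← cycle_eq]
    by_cases hm : cycleA s ∈ states
    case pos =>
      obtain ⟨k, hk⟩ := Option.isSome_iff_exists.1 (List.isSome_idxOf?.2 hm)
      have hseen1 : seen.get? (cycleA s) = some (k : Int) := by rw [hseen, hk]; rfl
      have hcA : seen.contains (cycleA s) = true := by
        rw [PySem.Dict.contains_eq_isSome_get?, hseen1]; rfl
      have hcB : states.contains (cycleA s) = true := List.contains_iff_mem.2 hm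
      have hj : seen.getD (cycleA s) 0 = (k : Int) := by
        rw [PySem.Dict.getD_eq_get?_getD, hseen1]; rfl
      have harith : ((states.length : Nat) : Int) - 1 + 1 = ((states.length : Nat) : Int) := by
        ring
      simp only [loopA, loopB, hcA, hcB, if_true, PySem.List.index?_eq_idxOf?, hk, hj,
        Option.getD_some, PySem.List.len_eq, ← cycle_eq, hi, harith]
    case neg =>
      have hk : List.idxOf? (cycleA s) states = none := by
        cases ho : List.idxOf? (cycleA s) states with
        | none => rfl
        | some k => exact absurd (List.isSome_idxOf?.1 (by rw [ho]; rfl)) hm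
      have hseen1 : seen.get? (cycleA s) = none := by rw [hseen, hk]; rfl
      have hcA : seen.contains (cycleA s) = false := by
        rw [PySem.Dict.contains_eq_isSome_get?, hseen1]; rfl
      have hcB : states.contains (cycleA s) = false := by
        cases hc : states.contains (cycleA s)
        · rfl
        · exact absurd (List.contains_iff_mem.1 hc) hm
      simp only [loopA, loopB, hcA, hcB, Bool.false_eq_true, if_false, ← cycle_eq]
      have harg1 : ∀ t, (seen.insert (cycleA s) (i + 1)).get? t =
          (List.idxOf? t (states ++ [cycleA s])).map (fun k => (k : Int)) := by
        intro t
        rw [PySem.Dict.get?_insert, idxOf?_append_singleton]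
        by_cases ht : t = cycleA s
        · subst ht
          rw [if_pos rfl, hk]
          simp
          omega
        · rw [if_neg ht, hseen t, if_neg ht]
          cases ho : List.idxOf? t states with
          | some k => simp [ho]
          | none => simp [ho]
      have harg2 : (i + 1 : Int) = (((states ++ [cycleA s]).length : Nat) : Int) - 1 := by
        simp
        omega
      have ihres := ih (seen.insert (cycleA s) (i + 1)) (states ++ [cycleA s]) (i + 1)
        (cycleA s) harg1 harg2
      rw [← cycle_eq] at ihres
      exact ihres

-- ===== VERDICT (by name: the statement is the Claim_ definition above) =====
theorem compute_spec : Claim_equal_compute := by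
  intro s _
  unfold Spec_compute compute compute_alt
  apply loop_eq
  · intro t
    rw [PySem.Dict.get?_insert, PySem.Dict.get?_empty, idxOf?_singleton]
    by_cases h : t = PySem.Str.rstrip s
    · subst h; simp
    · have h' : ¬ PySem.Str.rstrip s = t := fun hh => h hh.symm
      rw [if_neg h, if_neg h']
      rfl
  · simp
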